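-- pv_equiv track=rewrite | github.com/mahditaharb-maker/myfiles | python2/Euler.py | find_abc
-- ===== SOURCE A (Python) =====
-- def find_abc(p):
--     """
--     Find integers a, b, c (1 <= a,b,c <= (p-1)//2) such that
--     (a**(b*c) + 1) % p == 0.
--     Returns a tuple (a,b,c) or None if no solution is found.
--     """
--     half = (p - 1) // 2
--
--     # brute-force search
--     for a in range(1, half + 1):
--         for b in range(1, half + 1):
--             for c in range(1, half + 1):
--                 if pow(a, b * c, p) == p - 1:  # same as (a**(b*c)+1) % p == 0
--                     return a, b, c
--
--     return None
-- ===== SOURCE B (Python) =====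
-- def _gcd(b, t):
--     while t:
--         b, t = t, b % t
--     return b
--
-- def find_abc(p):
--     """
--     Same result as the brute-force search, via number theory: a^e % p == p-1
--     holds exactly when e is an odd multiple of t, the least exponent with
--     a^t % p == p-1.  Find t per a by one multiplicative scan, then for each b
--     the least valid c is t//gcd(b,t) (valid iff b//gcd(b,t) is odd).
--     """
--     half = (p - 1) // 2
--     cap = min(half * half, p)
--     for a in range(1, half + 1):
--         # least t >= 1 with a^t % p == p-1 (only t <= half*half can matter, and a minimal t is always <= p
--         # because the first t residues a^1..a^t mod p are pairwise distinct)
--         t = None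
--         x = a % p
--         e = 1
--         while e <= cap:
--             if x == p - 1:
--                 t = e
--                 break
--             if x == 1 or x == 0:
--                 break
--             x = x * a % p
--             e += 1
--         if t is None:
--             continue
--         for b in range(1, half + 1):
--             g = _gcd(b, t)
--             if (b // g) % 2 == 1 and t // g <= half:
--                 return a, b, t // g
--     return None
-- ===== Notes on version B (the rewrite author's own statement) =====
-- stated objective: faster
-- what changed: Instead of brute-forcing all (b,c) pairs with a modular pow per triple, B computes per base a the least exponent t with a^t % p == p-1 by one incremental multiplicative scan (capped by min(half^2, p), valid since the first t residues are pairwise distinct), then uses the characterization 'a^e % p == p-1 iff e is an odd multiple of t' to get the least valid c for each b directly as t//gcd(b,t) (valid iff b//gcd(b,t) is odd).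
import Mathlib
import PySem

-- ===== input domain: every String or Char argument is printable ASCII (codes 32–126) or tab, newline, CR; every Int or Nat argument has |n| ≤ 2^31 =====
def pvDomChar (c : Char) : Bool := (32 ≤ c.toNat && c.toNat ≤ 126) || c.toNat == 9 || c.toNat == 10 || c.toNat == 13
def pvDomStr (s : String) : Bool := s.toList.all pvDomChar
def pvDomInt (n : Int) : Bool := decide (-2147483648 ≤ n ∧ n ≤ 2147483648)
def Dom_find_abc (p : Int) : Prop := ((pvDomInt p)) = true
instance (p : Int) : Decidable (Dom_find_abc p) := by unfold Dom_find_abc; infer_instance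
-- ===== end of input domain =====

-- B replaces A's O(half^3) triple brute-force loop by, per base a, one multiplicative scan for the
-- least exponent t with a^t % p == p-1 and a gcd/parity formula for the least valid c per b (objective: faster).


def pvHalf (p : Int) : Int := PySem.Int.floordiv (p - 1) 2

-- ===== PORT A =====
def pvLoopC (p a b c : Int) : Option (List Int) :=
  if c ≤ pvHalf p then
    if PySem.Int.powMod a (b * c).toNat p = p - 1 then some [a, b, c]
    else pvLoopC p a b (c + 1)
  else none
termination_by (pvHalf p + 1 - c).toNat
decreasing_by omega

def pvLoopB (p a b : Int) : Option (List Int) :=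
  if b ≤ pvHalf p then
    match pvLoopC p a b 1 with
    | some r => some r
    | none => pvLoopB p a (b + 1)
  else none
termination_by (pvHalf p + 1 - b).toNat
decreasing_by omega

def pvLoopA (p a : Int) : Option (List Int) :=
  if a ≤ pvHalf p then
    match pvLoopB p a 1 with
    | some r => some r
    | none => pvLoopA p (a + 1)
  else none
termination_by (pvHalf p + 1 - a).toNat
decreasing_by omega

def find_abc (p : Int) : Option (List Int) := pvLoopA p 1

-- ===== PORT B =====
def pvGcd (b t : Int) : Int :=
  if _h : t = 0 then b else pvGcd t (PySem.Int.mod b t)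
termination_by t.natAbs
decreasing_by
  rcases lt_or_gt_of_ne _h with h1 | h1
  · have := PySem.Int.mod_neg_bounds (a := b) h1; omega
  · have h2 := PySem.Int.mod_nonneg (a := b) h1
    have h3 := PySem.Int.mod_lt (a := b) h1; omega

def pvScan (p cap a x e : Int) : Option Int :=
  if e ≤ cap then
    if x = p - 1 then some e
    else if x = 1 ∨ x = 0 then none
    else pvScan p cap a (PySem.Int.mod (x * a) p) (e + 1)
  else none
termination_by (cap + 1 - e).toNat
decreasing_by omega

def pvLoopB' (p t a b : Int) : Option (List Int) :=
  if b ≤ pvHalf p then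
    if PySem.Int.mod (PySem.Int.floordiv b (pvGcd b t)) 2 = 1 ∧
        PySem.Int.floordiv t (pvGcd b t) ≤ pvHalf p then
      some [a, b, PySem.Int.floordiv t (pvGcd b t)]
    else pvLoopB' p t a (b + 1)
  else none
termination_by (pvHalf p + 1 - b).toNat
decreasing_by omega

def pvLoopA' (p a : Int) : Option (List Int) :=
  if a ≤ pvHalf p then
    match pvScan p (min (pvHalf p * pvHalf p) p) a (PySem.Int.mod a p) 1 with
    | none => pvLoopA' p (a + 1)
    | some t =>
      match pvLoopB' p t a 1 with
      | some r => some r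
      | none => pvLoopA' p (a + 1)
  else none
termination_by (pvHalf p + 1 - a).toNat
decreasing_by omega

def find_abc_alt (p : Int) : Option (List Int) := pvLoopA' p 1

-- ===== PRECONDITION & SPEC =====
def Spec_find_abc (p : Int) (out : Option (List Int)) : Prop := out = find_abc_alt p
instance (p : Int) (out : Option (List Int)) : Decidable (Spec_find_abc p out) := by unfold Spec_find_abc; infer_instance

-- ===== CLAIM =====
def Claim_equal_find_abc : Prop := ∀ (p : Int), Dom_find_abc p → Spec_find_abc p (find_abc p)

-- ===== LEMMAS AND PROOFS =====

theorem pv_neg_one_emod (p : Int) (hp : 3 ≤ p) : (-1 : Int) % p = p - 1 := by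
  have h1 : ((-1) + p * 1) % p = (-1 : Int) % p := Int.add_mul_emod_self_left (-1) p 1
  have h2 : (p - 1) % p = p - 1 := Int.emod_eq_of_lt (by omega) (by omega)
  have h3 : (-1 : Int) + p * 1 = p - 1 := by ring
  rw [h3, h2] at h1; omega

theorem pvF_iff (p a : Int) (hp : 3 ≤ p) (n : Nat) :
    PySem.Int.powMod a n p = p - 1 ↔ a ^ n ≡ -1 [ZMOD p] := by
  show PySem.Int.mod (a ^ n) p = p - 1 ↔ _
  rw [PySem.Int.mod_eq_emod_of_pos (by omega : (0:Int) < p), Int.ModEq, pv_neg_one_emod p hp]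

theorem pv_one_iff (p a : Int) (hp : 3 ≤ p) (n : Nat) :
    PySem.Int.powMod a n p = 1 ↔ a ^ n ≡ 1 [ZMOD p] := by
  show PySem.Int.mod (a ^ n) p = 1 ↔ _
  rw [PySem.Int.mod_eq_emod_of_pos (by omega : (0:Int) < p), Int.ModEq,
      Int.emod_eq_of_lt (a := 1) (by omega) (by omega)]

theorem pv_zero_iff (p a : Int) (hp : 3 ≤ p) (n : Nat) :
    PySem.Int.powMod a n p = 0 ↔ a ^ n ≡ 0 [ZMOD p] := by
  show PySem.Int.mod (a ^ n) p = 0 ↔ _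
  rw [PySem.Int.mod_eq_emod_of_pos (by omega : (0:Int) < p), Int.ModEq,
      Int.emod_eq_of_lt (a := 0) (by omega) (by omega)]

theorem pv_not_one_neg_one (p : Int) (hp : 3 ≤ p) : ¬ ((1:Int) ≡ -1 [ZMOD p]) := by
  rw [Int.ModEq, Int.emod_eq_of_lt (a := 1) (by omega) (by omega), pv_neg_one_emod p hp]
  omega

theorem pv_pow_mod_period (p a : Int) (n : Nat) (h1 : a ^ n ≡ 1 [ZMOD p]) (m : Nat) :
    a ^ m ≡ a ^ (m % n) [ZMOD p] := by
  conv_lhs => rw [← Nat.mod_add_div m n, pow_add, pow_mul]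
  calc a ^ (m % n) * (a ^ n) ^ (m / n)
      ≡ a ^ (m % n) * 1 ^ (m / n) [ZMOD p] := Int.ModEq.mul_left _ (h1.pow _)
    _ = a ^ (m % n) := by ring

theorem pv_sq (p a : Int) (t : Nat) (h : a ^ t ≡ -1 [ZMOD p]) : a ^ (2 * t) ≡ 1 [ZMOD p] := by
  have := h.mul h
  simpa [← pow_add, two_mul] using this

theorem pv_no_one (p a : Int) (t : Nat)
    (hmin : ∀ s : Nat, 1 ≤ s → s < t → ¬ a ^ s ≡ -1 [ZMOD p])
    (ht : a ^ t ≡ -1 [ZMOD p]) :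
    ∀ s : Nat, 1 ≤ s → s < t → ¬ a ^ s ≡ 1 [ZMOD p] := by
  intro s hs1 hst hone
  have h1 : a ^ t = a ^ (t - s) * a ^ s := by rw [← pow_add]; congr 1; omega
  have h2 : a ^ (t - s) * a ^ s ≡ a ^ (t - s) * 1 [ZMOD p] := Int.ModEq.mul_left _ hone
  have h3 : a ^ (t - s) ≡ -1 [ZMOD p] := by
    calc a ^ (t - s) = a ^ (t - s) * 1 := by ring
    _ ≡ a ^ t [ZMOD p] := (h1 ▸ h2).symm
    _ ≡ -1 [ZMOD p] := ht
  exact hmin (t - s) (by omega) (by omega) h3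

theorem pv_nt (p a : Int) (hp : 3 ≤ p) (t : Nat) (ht1 : 1 ≤ t)
    (ht : a ^ t ≡ -1 [ZMOD p])
    (hmin : ∀ s : Nat, 1 ≤ s → s < t → ¬ a ^ s ≡ -1 [ZMOD p]) :
    ∀ e : Nat, 1 ≤ e → (a ^ e ≡ -1 [ZMOD p] ↔ ∃ j : Nat, e = (2 * j + 1) * t) := by
  intro e he
  have h2t := pv_sq p a t ht
  constructor
  · intro hgood
    have hq : a ^ e ≡ a ^ (e % (2 * t)) [ZMOD p] := pv_pow_mod_period p a (2 * t) h2t e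
    set q := e / (2 * t) with hqdef
    set r := e % (2 * t) with hr
    have hmd : r + 2 * t * q = e := Nat.mod_add_div e (2 * t)
    have hrlt : r < 2 * t := Nat.mod_lt _ (by omega)
    have hrgood : a ^ r ≡ -1 [ZMOD p] := hq.symm.trans hgood
    rcases Nat.eq_zero_or_pos r with h0 | hpos
    · exfalso
      rw [h0, pow_zero] at hrgood
      exact pv_not_one_neg_one p hp hrgood
    · rcases lt_trichotomy r t with h1 | h1 | h1
      · exact absurd hrgood (hmin r hpos h1)
      · exact ⟨q, by rw [← hmd, h1]; ring⟩
      · exfalso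
        have hs1 : a ^ (r - t) ≡ 1 [ZMOD p] := by
          have h1' : a ^ r = a ^ t * a ^ (r - t) := by rw [← pow_add]; congr 1; omega
          have h2 : a ^ t * a ^ (r - t) ≡ -1 * a ^ (r - t) [ZMOD p] :=
            Int.ModEq.mul_right _ ht
          have h3 : (-1 : Int) * a ^ (r - t) ≡ -1 [ZMOD p] := (h1' ▸ h2).symm.trans hrgood
          have h4 := h3.mul_left (-1)
          simpa using h4
        exact pv_no_one p a t hmin ht (r - t) (by omega) (by omega) hs1
  · rintro ⟨j, rfl⟩
    calc a ^ ((2 * j + 1) * t) = a ^ t * (a ^ (2 * t)) ^ j := by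
          rw [← pow_mul, ← pow_add]; ring_nf
      _ ≡ -1 * 1 ^ j [ZMOD p] := ht.mul (h2t.pow _)
      _ = -1 := by ring

theorem pv_odd_of_dvd_odd {d k : Nat} (h : d ∣ k) (hk : Odd k) : Odd d := by
  rcases Nat.even_or_odd d with he | ho
  · exfalso
    have h2 : 2 ∣ k := he.two_dvd.trans h
    have := Nat.odd_iff.mp hk
    omega
  · exact ho

theorem pv_sol_struct (b t c k : Nat) (hb : 1 ≤ b)
    (heq : b * c = k * t) (hk : Odd k) :
    t / Nat.gcd b t ∣ c ∧ Odd (b / Nat.gcd b t) := by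
  set g := Nat.gcd b t with hg
  have hg0 : 0 < g := Nat.gcd_pos_of_pos_left _ (by omega)
  have hgb : g ∣ b := Nat.gcd_dvd_left _ _
  have hgt : g ∣ t := Nat.gcd_dvd_right _ _
  have hco : Nat.Coprime (b / g) (t / g) := Nat.coprime_div_gcd_div_gcd hg0
  have heq' : (b / g) * c = k * (t / g) := by
    apply Nat.eq_of_mul_eq_mul_left hg0
    calc g * (b / g * c) = (g * (b / g)) * c := by ring
      _ = b * c := by rw [Nat.mul_div_cancel' hgb]
      _ = k * t := heq
      _ = k * (g * (t / g)) := by rw [Nat.mul_div_cancel' hgt]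
      _ = g * (k * (t / g)) := by ring
  constructor
  · have hd : (t / g) ∣ (b / g) * c := ⟨k, by rw [heq']; ring⟩
    exact (Nat.Coprime.dvd_of_dvd_mul_left hco.symm hd)
  · have hd : (b / g) ∣ k * (t / g) := ⟨c, heq'.symm⟩
    exact pv_odd_of_dvd_odd (Nat.Coprime.dvd_of_dvd_mul_right hco hd) hk

theorem pv_sol_witness (b t : Nat) (hodd : Odd (b / Nat.gcd b t)) :
    ∃ j : Nat, b * (t / Nat.gcd b t) = (2 * j + 1) * t := by
  set g := Nat.gcd b t with hg
  have hgb : g ∣ b := Nat.gcd_dvd_left _ _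
  have hgt : g ∣ t := Nat.gcd_dvd_right _ _
  obtain ⟨j, hj⟩ := hodd
  refine ⟨j, ?_⟩
  calc b * (t / g) = (g * (b / g)) * (t / g) := by rw [Nat.mul_div_cancel' hgb]
    _ = (b / g) * (g * (t / g)) := by ring
    _ = (b / g) * t := by rw [Nat.mul_div_cancel' hgt]
    _ = (2 * j + 1) * t := by rw [hj]

theorem pvGcd_eq (b t : Int) : 0 ≤ b → 0 ≤ t → pvGcd b t = (Nat.gcd t.toNat b.toNat : Int) := by
  induction b, t using pvGcd.induct with
  | case1 b => intro hb ht; rw [pvGcd]; simp; omega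
  | case2 b t h ih =>
    intro hb ht
    have ht0 : (0:Int) < t := lt_of_le_of_ne ht (Ne.symm h)
    rw [pvGcd]; simp only [h, dite_false]
    rw [ih ht (PySem.Int.mod_nonneg b ht0)]
    rw [PySem.Int.mod_eq_emod_of_pos ht0]
    congr 1
    rw [Int.toNat_emod hb ht]
    exact (Nat.gcd_rec t.toNat b.toNat).symm

theorem pv_step (p a : Int) (hp : 0 < p) (n : Nat) :
    PySem.Int.mod (PySem.Int.powMod a n p * a) p = PySem.Int.powMod a (n + 1) p := by
  show PySem.Int.mod (PySem.Int.mod (a ^ n) p * a) p = PySem.Int.mod (a ^ (n+1)) p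
  rw [PySem.Int.mod_eq_emod_of_pos hp, PySem.Int.mod_eq_emod_of_pos hp,
      PySem.Int.mod_eq_emod_of_pos hp]
  rw [Int.mul_emod (a ^ n % p) a p, Int.emod_emod_of_dvd _ dvd_rfl, ← Int.mul_emod, pow_succ]

theorem pv_scan_some (p cap a : Int) (hp : 3 ≤ p) (t : Nat) (_ht1 : 1 ≤ t)
    (htc : (t : Int) ≤ cap)
    (hGt : PySem.Int.powMod a t p = p - 1)
    (hmin : ∀ s : Nat, 1 ≤ s → s < t → PySem.Int.powMod a s p ≠ p - 1) :
    ∀ (x e : Int), 1 ≤ e → e ≤ (t : Int) → x = PySem.Int.powMod a e.toNat p →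
      pvScan p cap a x e = some t := by
  intro x e
  fun_induction pvScan p cap a x e with
  | case1 e hle =>
    intro he1 het hx
    have : e = (t : Int) := by
      by_contra hne
      exact hmin e.toNat (by omega) (by omega) (hx.symm)
    simp [this]
  | case2 x e hle hmiss hbr =>
    intro he1 het hx
    exfalso
    have hnet : e ≠ (t : Int) := by
      intro h; rw [h] at hx; simp at hx; exact hmiss (hx ▸ hGt)
    have hlt : e.toNat < t := by omega
    have hn1 : 1 ≤ e.toNat := by omega
    have htM : a ^ t ≡ -1 [ZMOD p] := (pvF_iff p a hp t).mp hGt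
    rcases hbr with h1 | h0
    · have hone : a ^ e.toNat ≡ 1 [ZMOD p] := (pv_one_iff p a hp _).mp (by rw [← hx]; exact h1)
      have hper := pv_pow_mod_period p a e.toNat hone t
      rcases Nat.eq_zero_or_pos (t % e.toNat) with hz | hpos
      · rw [hz, pow_zero] at hper
        exact pv_not_one_neg_one p hp (hper.symm.trans htM)
      · exact hmin (t % e.toNat) hpos (lt_of_lt_of_le (Nat.mod_lt _ (by omega)) hlt.le)
          ((pvF_iff p a hp _).mpr (hper.symm.trans htM))
    · have hzero : a ^ e.toNat ≡ 0 [ZMOD p] := (pv_zero_iff p a hp _).mp (by rw [← hx]; exact h0)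
      have h1' : a ^ t = a ^ e.toNat * a ^ (t - e.toNat) := by rw [← pow_add]; congr 1; omega
      have h2' : a ^ t ≡ 0 [ZMOD p] := by
        calc a ^ t = a ^ e.toNat * a ^ (t - e.toNat) := h1'
          _ ≡ 0 * a ^ (t - e.toNat) [ZMOD p] := Int.ModEq.mul_right _ hzero
          _ = 0 := by ring
      have h3' : (0 : Int) ≡ -1 [ZMOD p] := h2'.symm.trans htM
      rw [Int.ModEq, Int.emod_eq_of_lt (a := 0) (by omega) (by omega), pv_neg_one_emod p hp] at h3'
      omega
  | case3 x e hle hmiss hbr ih =>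
    intro he1 het hx
    apply ih
    · omega
    · have hnet : e ≠ (t : Int) := by
        intro h; rw [h] at hx; simp at hx; exact hmiss (hx ▸ hGt)
      omega
    · rw [hx, pv_step p a (by omega)]
      congr 1
      omega
  | case4 x e hle =>
    intro he1 het hx
    omega

theorem pv_scan_none (p cap a : Int) (hp : 3 ≤ p)
    (h : ∀ s : Nat, 1 ≤ s → (s : Int) ≤ cap → PySem.Int.powMod a s p ≠ p - 1) :
    ∀ (x e : Int), 1 ≤ e → x = PySem.Int.powMod a e.toNat p →
      pvScan p cap a x e = none := by
  intro x e
  fun_induction pvScan p cap a x e with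
  | case1 e hle =>
    intro he1 hx
    exact absurd hx.symm (h e.toNat (by omega) (by omega))
  | case2 x e hle hmiss hbr => intro he1 hx; rfl
  | case3 x e hle hmiss hbr ih =>
    intro he1 hx
    apply ih (by omega)
    rw [hx, pv_step p a (by omega)]
    congr 1
    omega
  | case4 x e hle => intro he1 hx; rfl
theorem pv_loopC_none (p a b : Int)
    (h : ∀ c', 1 ≤ c' → c' ≤ pvHalf p → PySem.Int.powMod a (b * c').toNat p ≠ p - 1) :
    ∀ c, 1 ≤ c → pvLoopC p a b c = none := by
  intro c
  fun_induction pvLoopC p a b c with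
  | case1 c hle hhit => intro hc1; exact absurd hhit (h c hc1 hle)
  | case2 c hle hmiss ih => intro hc1; exact ih (by omega)
  | case3 c hle => intro _; rfl

theorem pv_loopC_some (p a b c0 : Int) (hc0 : c0 ≤ pvHalf p)
    (hGood : PySem.Int.powMod a (b * c0).toNat p = p - 1)
    (hmin : ∀ c', 1 ≤ c' → c' < c0 → PySem.Int.powMod a (b * c').toNat p ≠ p - 1) :
    ∀ c, 1 ≤ c → c ≤ c0 → pvLoopC p a b c = some [a, b, c0] := by
  intro c
  fun_induction pvLoopC p a b c with
  | case1 c hle hhit =>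
    intro hc1 hcc0
    have : c = c0 := by
      by_contra hne
      exact hmin c hc1 (by omega) hhit
    rw [this]
  | case2 c hle hmiss ih =>
    intro hc1 hcc0
    have : c ≠ c0 := by intro h; rw [h] at hmiss; exact hmiss hGood
    exact ih (by omega) (by omega)
  | case3 c hle => intro hc1 hcc0; omega

theorem pv_loopB_eq (p t a : Int)
    (h : ∀ b, 1 ≤ b → b ≤ pvHalf p →
      pvLoopC p a b 1 =
        (if PySem.Int.mod (PySem.Int.floordiv b (pvGcd b t)) 2 = 1 ∧
             PySem.Int.floordiv t (pvGcd b t) ≤ pvHalf p then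
           some [a, b, PySem.Int.floordiv t (pvGcd b t)]
         else none)) :
    ∀ b, 1 ≤ b → pvLoopB p a b = pvLoopB' p t a b := by
  intro b
  fun_induction pvLoopB' p t a b with
  | case1 b hle hcond =>
    intro hb1
    rw [pvLoopB, if_pos hle, h b hb1 hle, if_pos hcond]
  | case2 b hle hcond ih =>
    intro hb1
    rw [pvLoopB, if_pos hle, h b hb1 hle, if_neg hcond]
    exact ih (by omega)
  | case3 b hle =>
    intro hb1
    rw [pvLoopB, if_neg hle]

theorem pv_loopB_none (p a : Int)
    (h : ∀ b, 1 ≤ b → b ≤ pvHalf p → pvLoopC p a b 1 = none) :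
    ∀ b, 1 ≤ b → pvLoopB p a b = none := by
  intro b
  fun_induction pvLoopB p a b with
  | case1 b hle r heq =>
    intro hb1
    rw [h b hb1 hle] at heq
    exact absurd heq (by simp)
  | case2 b hle heq ih => intro hb1; exact ih (by omega)
  | case3 b hle => intro _; rfl

theorem pv_toNat_mul (b c : Int) (hb : 0 ≤ b) (hc : 0 ≤ c) :
    (b * c).toNat = b.toNat * c.toNat := by
  rcases Int.eq_ofNat_of_zero_le hb with ⟨m, rfl⟩
  rcases Int.eq_ofNat_of_zero_le hc with ⟨n, rfl⟩
  norm_cast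

theorem pv_good_imp (p a : Int) (hp : 3 ≤ p) (t : Nat) (ht1 : 1 ≤ t)
    (htM : a ^ t ≡ -1 [ZMOD p])
    (hminM : ∀ s : Nat, 1 ≤ s → s < t → ¬ a ^ s ≡ -1 [ZMOD p])
    (b c : Int) (hb1 : 1 ≤ b) (hc1 : 1 ≤ c)
    (hG : PySem.Int.powMod a (b * c).toNat p = p - 1) :
    t / Nat.gcd b.toNat t ∣ c.toNat ∧ Odd (b.toNat / Nat.gcd b.toNat t) := by
  have hbc : (b * c).toNat = b.toNat * c.toNat := pv_toNat_mul b c (by omega) (by omega)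
  rw [hbc] at hG
  have hn1 : 1 ≤ b.toNat * c.toNat := Nat.one_le_iff_ne_zero.mpr (by
    have : b.toNat ≠ 0 ∧ c.toNat ≠ 0 := by omega
    simp [this.1, this.2])
  have hMod : a ^ (b.toNat * c.toNat) ≡ -1 [ZMOD p] := (pvF_iff p a hp _).mp hG
  obtain ⟨j, hj⟩ := (pv_nt p a hp t ht1 htM hminM _ hn1).mp hMod
  exact pv_sol_struct b.toNat t c.toNat (2 * j + 1) (by omega)
    (by rw [hj]) ⟨j, by omega⟩

-- the per-b equality: A's inner c-scan equals B's gcd test, under knowledge of t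
theorem pv_perB (p a : Int) (hp : 3 ≤ p) (t : Nat) (ht1 : 1 ≤ t)
    (htG : PySem.Int.powMod a t p = p - 1)
    (hminG : ∀ s : Nat, 1 ≤ s → s < t → PySem.Int.powMod a s p ≠ p - 1)
    (b : Int) (hb1 : 1 ≤ b) (_hbH : b ≤ pvHalf p) :
    pvLoopC p a b 1 =
      (if PySem.Int.mod (PySem.Int.floordiv b (pvGcd b (t : Int))) 2 = 1 ∧
           PySem.Int.floordiv (t : Int) (pvGcd b (t : Int)) ≤ pvHalf p then
         some [a, b, PySem.Int.floordiv (t : Int) (pvGcd b (t : Int))]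
       else none) := by
  have htM : a ^ t ≡ -1 [ZMOD p] := (pvF_iff p a hp t).mp htG
  have hminM : ∀ s : Nat, 1 ≤ s → s < t → ¬ a ^ s ≡ -1 [ZMOD p] := fun s h1 h2 hM =>
    hminG s h1 h2 ((pvF_iff p a hp s).mpr hM)
  have hbcast : ((b.toNat : Int)) = b := by omega
  have hg0 : 0 < Nat.gcd b.toNat t := Nat.gcd_pos_of_pos_left _ (by omega)
  have hgt : Nat.gcd b.toNat t ∣ t := Nat.gcd_dvd_right _ _
  have ht'1 : 1 ≤ t / Nat.gcd b.toNat t :=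
    (Nat.one_le_div_iff hg0).mpr (Nat.le_of_dvd (by omega) hgt)
  have hgcd : pvGcd b (t : Int) = ((Nat.gcd b.toNat t : Nat) : Int) := by
    rw [pvGcd_eq b (t : Int) (by omega) (by omega), Int.toNat_natCast]
    exact congrArg _ (Nat.gcd_comm _ _)
  have hdivb : PySem.Int.floordiv b (pvGcd b (t : Int)) = ((b.toNat / Nat.gcd b.toNat t : Nat) : Int) := by
    rw [hgcd, ← hbcast]; exact PySem.Int.floordiv_natCast _ _
  have hdivt : PySem.Int.floordiv (t : Int) (pvGcd b (t : Int)) = ((t / Nat.gcd b.toNat t : Nat) : Int) := by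
    rw [hgcd]; exact PySem.Int.floordiv_natCast _ _
  have hmodd : PySem.Int.mod (PySem.Int.floordiv b (pvGcd b (t : Int))) 2 = 1 ↔ Odd (b.toNat / Nat.gcd b.toNat t) := by
    rw [hdivb, show (2 : Int) = ((2 : Nat) : Int) by norm_num, PySem.Int.mod_natCast, Nat.odd_iff]
    constructor
    · intro h; exact_mod_cast h
    · intro h; exact_mod_cast h
  by_cases hodd : Odd (b.toNat / Nat.gcd b.toNat t)
  · by_cases hle : ((t / Nat.gcd b.toNat t : Nat) : Int) ≤ pvHalf p
    · rw [if_pos ⟨hmodd.mpr hodd, by rw [hdivt]; exact hle⟩, hdivt]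
      apply pv_loopC_some p a b ((t / Nat.gcd b.toNat t : Nat) : Int) hle _ _ 1 (le_refl 1)
        (by exact_mod_cast ht'1)
      · have hbc : (b * ((t / Nat.gcd b.toNat t : Nat) : Int)).toNat
            = b.toNat * (t / Nat.gcd b.toNat t) := by
          rw [pv_toNat_mul _ _ (by omega) (by omega), Int.toNat_natCast]
        rw [hbc]
        obtain ⟨j, hj⟩ := pv_sol_witness b.toNat t hodd
        apply (pvF_iff p a hp _).mpr
        refine (pv_nt p a hp t ht1 htM hminM _ ?_).mpr ⟨j, hj⟩
        have h1 : b.toNat ≠ 0 := by omega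
        have h2 : t / Nat.gcd b.toNat t ≠ 0 := Nat.one_le_iff_ne_zero.mp ht'1
        exact Nat.one_le_iff_ne_zero.mpr (by simp [h1, h2])
      · intro c' hc1 hlt hG
        obtain ⟨hdvd, -⟩ := pv_good_imp p a hp t ht1 htM hminM b c' hb1 hc1 hG
        have := Nat.le_of_dvd (by omega) hdvd
        omega
    · rw [if_neg (by rw [hdivt]; exact fun h => hle h.2)]
      refine pv_loopC_none p a b ?_ 1 (le_refl 1)
      intro c' hc1 hcH hG
      obtain ⟨hdvd, -⟩ := pv_good_imp p a hp t ht1 htM hminM b c' hb1 hc1 hG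
      have := Nat.le_of_dvd (by omega) hdvd
      omega
  · rw [if_neg (by rw [hmodd]; exact fun h => hodd h.1)]
    refine pv_loopC_none p a b ?_ 1 (le_refl 1)
    intro c' hc1 hcH hG
    obtain ⟨-, ho⟩ := pv_good_imp p a hp t ht1 htM hminM b c' hb1 hc1 hG
    exact hodd ho

theorem pv_powMod_modeq (p a : Int) (hp : 3 ≤ p) (i j : Nat)
    (h : PySem.Int.powMod a i p = PySem.Int.powMod a j p) : a ^ i ≡ a ^ j [ZMOD p] := by
  have h' : PySem.Int.mod (a ^ i) p = PySem.Int.mod (a ^ j) p := h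
  rwa [PySem.Int.mod_eq_emod_of_pos (by omega : (0:Int) < p),
       PySem.Int.mod_eq_emod_of_pos (by omega : (0:Int) < p)] at h'

-- the residues a^1 % p, ..., a^t % p below the minimal hit t are pairwise distinct
theorem pv_scan_inj (p a : Int) (hp : 3 ≤ p) (t : Nat)
    (htG : PySem.Int.powMod a t p = p - 1)
    (hminG : ∀ s : Nat, 1 ≤ s → s < t → PySem.Int.powMod a s p ≠ p - 1) :
    ∀ i j : Nat, 1 ≤ i → i < j → j ≤ t →
      PySem.Int.powMod a i p ≠ PySem.Int.powMod a j p := by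
  intro i j hi hij hjt heq
  have hM : a ^ j ≡ a ^ i [ZMOD p] := (pv_powMod_modeq p a hp i j heq).symm
  have hshift : a ^ t ≡ a ^ (t - j + i) [ZMOD p] := by
    calc a ^ t = a ^ (t - j) * a ^ j := by rw [← pow_add]; congr 1; omega
      _ ≡ a ^ (t - j) * a ^ i [ZMOD p] := Int.ModEq.mul_left _ hM
      _ = a ^ (t - j + i) := by rw [← pow_add]
  have htM : a ^ t ≡ -1 [ZMOD p] := (pvF_iff p a hp t).mp htG
  exact hminG (t - j + i) (by omega) (by omega)
    ((pvF_iff p a hp _).mpr (hshift.symm.trans htM))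

-- pigeonhole: t distinct residues in [0, p) force t ≤ p
theorem pv_t_le_p (p a : Int) (hp : 3 ≤ p) (t : Nat)
    (htG : PySem.Int.powMod a t p = p - 1)
    (hminG : ∀ s : Nat, 1 ≤ s → s < t → PySem.Int.powMod a s p ≠ p - 1) :
    (t : Int) ≤ p := by
  have hmaps : ∀ k : Fin t, PySem.Int.powMod a (k.1 + 1) p ∈ Finset.Ico (0 : Int) p := by
    intro k
    rw [Finset.mem_Ico]
    exact ⟨PySem.Int.mod_nonneg _ (by omega), PySem.Int.mod_lt _ (by omega)⟩
  have hinj : Set.InjOn (fun k : Fin t => PySem.Int.powMod a (k.1 + 1) p) (Finset.univ : Finset (Fin t)) := by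
    intro i _ j _ heq
    by_contra hne
    rcases Nat.lt_or_ge i.1 j.1 with hlt | hge
    · exact pv_scan_inj p a hp t htG hminG (i.1 + 1) (j.1 + 1) (by omega) (by omega)
        (by omega) heq
    · have hlt : j.1 < i.1 := by
        rcases Nat.lt_or_ge j.1 i.1 with h | h
        · exact h
        · exact absurd (Fin.ext (by omega)) hne
      exact pv_scan_inj p a hp t htG hminG (j.1 + 1) (i.1 + 1) (by omega) (by omega)
        (by omega) heq.symm
  have hcard := Finset.card_le_card_of_injOn _ (fun k _ => hmaps k) hinj
  rw [Finset.card_univ, Fintype.card_fin, Int.card_Ico] at hcard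
  omega

theorem pv_perA (p a : Int) (hp : 3 ≤ p) (ha1 : 1 ≤ a) (ha2 : a ≤ pvHalf p) :
    pvLoopB p a 1 =
      (match pvScan p (min (pvHalf p * pvHalf p) p) a (PySem.Int.mod a p) 1 with
       | none => (none : Option (List Int))
       | some t => pvLoopB' p t a 1) := by
  have hx1 : PySem.Int.mod a p = PySem.Int.powMod a ((1 : Int)).toNat p := by
    show _ = PySem.Int.mod (a ^ (1:Int).toNat) p
    norm_num
  by_cases hex : ∃ n : Nat, 1 ≤ n ∧ PySem.Int.powMod a n p = p - 1
  · classical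
    obtain ⟨ht1, htG⟩ := Nat.find_spec hex
    have hminG : ∀ s : Nat, 1 ≤ s → s < Nat.find hex → PySem.Int.powMod a s p ≠ p - 1 := by
      intro s h1 h2 hG
      exact Nat.find_min hex h2 ⟨h1, hG⟩
    have htp : ((Nat.find hex : Nat) : Int) ≤ p := pv_t_le_p p a hp _ htG hminG
    by_cases hth : ((Nat.find hex : Nat) : Int) ≤ pvHalf p * pvHalf p
    · have hscan : pvScan p (min (pvHalf p * pvHalf p) p) a (PySem.Int.mod a p) 1
          = some ((Nat.find hex : Nat) : Int) :=
        pv_scan_some p _ a hp _ ht1 (le_min hth htp) htG hminG _ 1 (le_refl 1)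
          (by exact_mod_cast ht1) hx1
      rw [hscan]
      exact pv_loopB_eq p _ a
        (fun b hb1 hbH => pv_perB p a hp _ ht1 htG hminG b hb1 hbH) 1 (le_refl 1)
    · have hcap := min_le_left (pvHalf p * pvHalf p) p
      have hscan : pvScan p (min (pvHalf p * pvHalf p) p) a (PySem.Int.mod a p) 1 = none :=
        pv_scan_none p _ a hp
          (fun s h1 h2 => hminG s h1 (by omega)) _ 1 (le_refl 1) hx1
      rw [hscan]
      refine pv_loopB_none p a ?_ 1 (le_refl 1)
      intro b hb1 hbH
      refine pv_loopC_none p a b ?_ 1 (le_refl 1)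
      intro c' hc1 hcH hG
      have hpos : 0 < b * c' := mul_pos (by omega) (by omega)
      have hle : b * c' ≤ pvHalf p * pvHalf p := mul_le_mul hbH hcH (by omega) (by omega)
      exact hminG (b * c').toNat (by omega) (by omega) hG
  · have hex' : ∀ n : Nat, 1 ≤ n → PySem.Int.powMod a n p ≠ p - 1 :=
      fun n h1 hG => hex ⟨n, h1, hG⟩
    have hscan : pvScan p (min (pvHalf p * pvHalf p) p) a (PySem.Int.mod a p) 1 = none :=
      pv_scan_none p _ a hp (fun s h1 _ => hex' s h1) _ 1 (le_refl 1) hx1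
    rw [hscan]
    refine pv_loopB_none p a ?_ 1 (le_refl 1)
    intro b hb1 hbH
    refine pv_loopC_none p a b ?_ 1 (le_refl 1)
    intro c' hc1 hcH hG
    exact hex' (b * c').toNat (by have : 0 < b * c' := mul_pos (by omega) (by omega); omega) hG

theorem pv_loopA_eq (p : Int) (hp : 3 ≤ p) : ∀ a, 1 ≤ a → pvLoopA p a = pvLoopA' p a := by
  intro a
  fun_induction pvLoopA' p a with
  | case1 a hle heq ih =>
    intro ha1
    rw [pvLoopA, if_pos hle, pv_perA p a hp ha1 hle]
    simp only [heq]
    exact ih (by omega)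
  | case2 a hle t heq r heq2 =>
    intro ha1
    rw [pvLoopA, if_pos hle, pv_perA p a hp ha1 hle]
    simp only [heq, heq2]
  | case3 a hle t heq heq2 ih =>
    intro ha1
    rw [pvLoopA, if_pos hle, pv_perA p a hp ha1 hle]
    simp only [heq, heq2]
    exact ih (by omega)
  | case4 a hle =>
    intro ha1
    rw [pvLoopA, if_neg hle]

-- ===== VERDICT =====
theorem find_abc_spec : Claim_equal_find_abc := by
  unfold Claim_equal_find_abc Spec_find_abc
  intro p _
  by_cases hp : 3 ≤ p
  · exact pv_loopA_eq p hp 1 (le_refl 1)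
  · have hH : ¬ ((1:Int) ≤ pvHalf p) := by
      rw [pvHalf]
      intro hcon
      rw [PySem.Int.le_floordiv_iff_mul_le (by omega)] at hcon
      omega
    show pvLoopA p 1 = pvLoopA' p 1
    rw [pvLoopA, pvLoopA', if_neg hH, if_neg hH]
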